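-- pv_equiv track=rewrite | github.com/kishlaykumar1995/PlakshaTLP | Term 1/Maths and Python/Python Project/secret.py | cryptanalyse_vigenere_afterlength
-- ===== SOURCE A (Python) =====
-- def letter_distribution(s):
--     '''Consider the string s which comprises of only lowercase letters. Count
--     the number of occurrences of each letter and return a dictionary'''
--     d = {}
--     for c in s:
--         if c in d.keys():
--             d[c]+=1
--         else:
--             d[c] = 1
--     return d
--
-- def cryptanalyse_substitution(s):
--     '''Given that the string s is given to us and it is known that it was
--     encrypted using some substitution cipher, predict the d'''
--     dist = letter_distribution(s)
--     max_letter = max(dist, key=lambda x:dist[x])    # Find the letter with the highest frequency in ciphertext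
--     key = ord(max_letter) - ord('e')                # 'e' is the most common letter in text (From plaintext letter distribution)
--                                                     # Thus, we can find the difference between highest occuring letter in ciphertext
--                                                     #  and 'e' to get the Caesar Cipher key.
--     pred_decrypt = ''
--     for char in s:
--         pred_decrypt+= chr((ord(char)-97-key+26)%26 + 97)   # Calculate the unicode for each letter
--     return pred_decrypt
--
-- def cryptanalyse_vigenere_afterlength(s,k):
--     '''Given the string s which is known to be vigenere encrypted with a
--     password of length k, find out what is the password'''
--     sub_s = ['']*k
--     for i in range(len(s)):
--         sub_s[i%k]+=s[i]
--
--     final_decrypted = []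
--     for caesar in sub_s:                                            # Extract all sub ciphers encrypted using the same letter.
--         final_decrypted.append(cryptanalyse_substitution(caesar))   # Assumption here is that for a long enough cipher
--                                                                     # the frequency distribution remains the same. So each
--                                                                     # sub cipher extracted can be decrypted using substitution.
--
--     max_len = len(max(final_decrypted, key=lambda x:len(x)))
--     vig_dec_fin = ''
--     for i in range(max_len):                                        # Re join all sub ciphers
--         for j in final_decrypted:
--             if i < len(j):
--                 vig_dec_fin+=j[i]
--
--     return vig_dec_fin
-- ===== SOURCE B (Python) =====
-- def cryptanalyse_vigenere_afterlength(s, k):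
--     '''Given the string s which is known to be vigenere encrypted with a
--     password of length k, find out what is the password'''
--     counts = [dict() for _ in range(k)]
--     for i in range(len(s)):
--         d = counts[i % k]
--         c = s[i]
--         d[c] = d.get(c, 0) + 1
--     shifts = [ord(max(d, key=lambda x: d[x])) - ord('e') for d in counts]
--     return ''.join(chr((ord(s[i]) - 97 - shifts[i % k] + 26) % 26 + 97)
--                    for i in range(len(s)))
-- ===== Notes on version B (the rewrite author's own statement) =====
-- stated objective: alternative
-- what changed: B replaces A's split-into-column-strings / per-column decrypt / nested reinterleave with one interleaved counting pass into k dicts, a per-column shift table, and a single linear decode of the original string (no column strings and no reinterleaving are ever built).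
import Mathlib
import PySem

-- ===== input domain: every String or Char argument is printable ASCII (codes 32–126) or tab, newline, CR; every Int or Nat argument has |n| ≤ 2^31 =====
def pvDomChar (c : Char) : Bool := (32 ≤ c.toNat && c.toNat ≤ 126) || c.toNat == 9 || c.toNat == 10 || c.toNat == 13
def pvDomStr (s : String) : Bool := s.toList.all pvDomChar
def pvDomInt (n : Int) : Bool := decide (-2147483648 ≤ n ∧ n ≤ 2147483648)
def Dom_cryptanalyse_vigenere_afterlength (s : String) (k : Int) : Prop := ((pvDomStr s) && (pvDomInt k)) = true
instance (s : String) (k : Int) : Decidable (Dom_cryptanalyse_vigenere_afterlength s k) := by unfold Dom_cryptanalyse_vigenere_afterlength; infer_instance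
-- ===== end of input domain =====

-- B replaces A's split-into-column-strings → per-column decrypt → nested reinterleave with one
-- interleaved counting pass into k dicts, a per-column shift table, and a single linear decode
-- pass over the original string (alternative decomposition; no column strings, no reinterleave).


-- ===== PORT A =====
-- chr((ord(char) - 97 - key + 26) % 26 + 97)  (same expression in both Python sources)
def pvShift (ch : Char) (key : Int) : Char :=
  Char.ofNat ((PySem.Int.mod ((ch.toNat : Int) - 97 - key + 26) 26 + 97).toNat)

-- the body of A's letter_distribution loop
def pvCountStepA (d : PySem.Dict Char Int) (c : Char) : PySem.Dict Char Int :=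
  if d.contains c then d.insert c (d.getD c 0 + 1) else d.insert c 1

def pvLetterDistribution (cs : List Char) : PySem.Dict Char Int :=
  cs.foldl pvCountStepA PySem.Dict.empty

-- A's cryptanalyse_substitution; none = Python's ValueError from max over an empty distribution
def pvCryptSub (cs : List Char) : Option (List Char) :=
  match PySem.List.max? (pvLetterDistribution cs).keys
      (fun x => (pvLetterDistribution cs).getD x 0) with
  | none => none
  | some m =>
      some (cs.foldl (fun acc ch => acc ++ [pvShift ch ((m.toNat : Int) - 101)]) [])

def cryptanalyse_vigenere_afterlength (s : String) (k : Int) : String :=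
  let cs := s.toList
  -- k ≤ 0 with nonempty s: Python raises (ZeroDivisionError / IndexError); excluded by Pre_
  if k ≤ 0 ∧ cs ≠ [] then "" else
  let kn := k.toNat
  let subs := (List.range cs.length).foldl
      (fun sub i => sub.set (i % kn) ((sub.getD (i % kn) []) ++ [cs.getD i ' ']))
      (List.replicate kn ([] : List Char))
  let finals := subs.foldl (fun acc caesar => acc ++ [pvCryptSub caesar]) []
  if finals.all (fun o => o.isSome) then
    let decs := finals.map (fun o => o.getD [])
    match PySem.List.max? decs (fun x => PySem.List.len x) with
    | none => ""  -- max over the empty list: Python ValueError; excluded by Pre_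
    | some mx =>
      String.ofList ((List.range mx.length).foldl (fun acc i =>
        decs.foldl (fun a col => if i < col.length then a ++ [col.getD i ' '] else a) acc) [])
  else ""  -- some column was empty: Python ValueError from max; excluded by Pre_

-- ===== PORT B =====
-- the body of B's counting loop: d[c] = d.get(c, 0) + 1
def pvCountStepB (d : PySem.Dict Char Int) (c : Char) : PySem.Dict Char Int :=
  d.insert c (d.getD c 0 + 1)

def cryptanalyse_vigenere_afterlength_alt (s : String) (k : Int) : String :=
  let cs := s.toList
  -- k ≤ 0 with nonempty s: i % k raises in Python; excluded by Pre_
  if k ≤ 0 ∧ cs ≠ [] then "" else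
  let kn := k.toNat
  let counts := (List.range cs.length).foldl
      (fun cnts i => cnts.set (i % kn) (pvCountStepB (cnts.getD (i % kn) PySem.Dict.empty) (cs.getD i ' ')))
      (List.replicate kn (PySem.Dict.empty : PySem.Dict Char Int))
  let shifts := counts.map (fun d =>
      (PySem.List.max? d.keys (fun x => d.getD x 0)).map (fun m => (m.toNat : Int) - 101))
  if shifts.all (fun o => o.isSome) then
    String.ofList ((List.range cs.length).map (fun i =>
      pvShift (cs.getD i ' ') ((shifts.getD (i % kn) none).getD 0)))
  else ""  -- some column was empty: Python ValueError from max; excluded by Pre_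

-- ===== PRECONDITION & SPEC =====
-- Pre_ is exactly where the Python A returns: k must satisfy 1 ≤ k ≤ len(s); otherwise A raises
-- (ZeroDivisionError / IndexError for k ≤ 0, ValueError from max over an empty column for k > len(s)).
def Pre_cryptanalyse_vigenere_afterlength (s : String) (k : Int) : Prop :=
  1 ≤ k ∧ k ≤ PySem.Str.len s
instance (s : String) (k : Int) : Decidable (Pre_cryptanalyse_vigenere_afterlength s k) := by
  unfold Pre_cryptanalyse_vigenere_afterlength; infer_instance

def pvWitness_cryptanalyse_vigenere_afterlength : String × Int := ("abcab", 2)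

def Spec_cryptanalyse_vigenere_afterlength (s : String) (k : Int) (out : String) : Prop := out = cryptanalyse_vigenere_afterlength_alt s k
instance (s : String) (k : Int) (out : String) : Decidable (Spec_cryptanalyse_vigenere_afterlength s k out) := by unfold Spec_cryptanalyse_vigenere_afterlength; infer_instance

-- ===== CLAIM (what is proved, stated in full; the proofs are below) =====
def Claim_equal_cryptanalyse_vigenere_afterlength : Prop := ∀ (s : String) (k : Int), Dom_cryptanalyse_vigenere_afterlength s k → Pre_cryptanalyse_vigenere_afterlength s k → Spec_cryptanalyse_vigenere_afterlength s k (cryptanalyse_vigenere_afterlength s k)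

-- ===== LEMMAS AND PROOFS =====

-- indices of column j among 0..n-1 (stride kn), and the column of a list
def pvColIdx (n kn j : ℕ) : List ℕ := (List.range n).filter (fun i => i % kn == j)
def pvColOf (t : List Char) (j kn : ℕ) : List Char := (pvColIdx t.length kn j).map (fun i => t.getD i ' ')

-- per-column distribution and the shift ("key") both ports derive from it
def pvDist (cs : List Char) (kn j : ℕ) : PySem.Dict Char Int :=
  (pvColOf cs j kn).foldl pvCountStepB PySem.Dict.empty
def pvKey (cs : List Char) (kn j : ℕ) : Int :=
  match PySem.List.max? (pvDist cs kn j).keys (fun x => (pvDist cs kn j).getD x 0) with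
  | none => 0
  | some m => (m.toNat : Int) - 101

-- A's and B's counting steps coincide
theorem pvCountStep_eq : pvCountStepA = pvCountStepB := by
  funext d c
  unfold pvCountStepA pvCountStepB
  by_cases h : d.contains c = true
  · simp [h]
  · have hc : PySem.Dict.getD d c 0 = 0 := by
      rw [PySem.Dict.getD_of_not_contains]; simpa using h
    simp [h, hc]

theorem pvCnt_iff (n kn j q : ℕ) (hj : j < kn) :
    q < (n + kn - 1 - j) / kn ↔ q * kn + j < n := by
  rw [Nat.lt_div_iff_mul_lt (by omega)]; omega

theorem pvColIdx_eq (n kn j : ℕ) (hj : j < kn) :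
    pvColIdx n kn j = (List.range ((n + kn - 1 - j) / kn)).map (fun q => q * kn + j) := by
  have hkn : 0 < kn := by omega
  refine List.Perm.eq_of_pairwise (le := (· ≤ ·))
    (fun a b _ _ h1 h2 => Nat.le_antisymm h1 h2) ?_ ?_ ?_
  · exact (List.Pairwise.sublist List.filter_sublist List.pairwise_lt_range).imp le_of_lt
  · refine (List.pairwise_lt_range).map _ ?_
    intro a b hab
    have := (Nat.mul_lt_mul_right hkn).mpr hab
    omega
  · rw [List.perm_ext_iff_of_nodup]
    · intro x
      simp only [pvColIdx, List.mem_filter, List.mem_range, List.mem_map, beq_iff_eq]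
      constructor
      · rintro ⟨hx, hm⟩
        refine ⟨x / kn, ?_, ?_⟩
        · rw [pvCnt_iff n kn j _ hj]
          calc x / kn * kn + j = kn * (x / kn) + x % kn := by rw [Nat.mul_comm, hm]
            _ = x := Nat.div_add_mod x kn
            _ < n := hx
        · calc x / kn * kn + j = kn * (x / kn) + x % kn := by rw [Nat.mul_comm, hm]
            _ = x := Nat.div_add_mod x kn
      · rintro ⟨q, hq, rfl⟩
        refine ⟨(pvCnt_iff n kn j q hj).1 hq, ?_⟩
        rw [Nat.add_comm, Nat.add_mul_mod_self_right, Nat.mod_eq_of_lt hj]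
    · exact (List.nodup_range).filter _
    · refine (List.nodup_range).map ?_
      intro a b hab
      have hab' : a * kn + j = b * kn + j := hab
      exact Nat.eq_of_mul_eq_mul_right hkn (by omega)

theorem pvColIdx_get (n kn j : ℕ) (hj : j < kn) (q : ℕ) :
    (pvColIdx n kn j)[q]? = if q * kn + j < n then some (q * kn + j) else none := by
  rw [pvColIdx_eq n kn j hj, List.getElem?_map]
  by_cases hq : q < (n + kn - 1 - j) / kn
  · rw [List.getElem?_range hq, if_pos ((pvCnt_iff n kn j q hj).1 hq)]
    rfl
  · rw [List.getElem?_eq_none (by simpa using Nat.le_of_not_lt hq),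
      if_neg (fun h => hq ((pvCnt_iff n kn j q hj).2 h))]
    rfl

theorem pvColIdx_lt_iff (n kn j : ℕ) (hj : j < kn) (q : ℕ) :
    q < (pvColIdx n kn j).length ↔ q * kn + j < n := by
  rw [pvColIdx_eq n kn j hj, List.length_map, List.length_range]
  exact pvCnt_iff n kn j q hj

theorem pvColIdx_succ (n kn j : ℕ) :
    pvColIdx (n + 1) kn j
      = pvColIdx n kn j ++ (if n % kn == j then [n] else []) := by
  unfold pvColIdx
  rw [List.range_succ, List.filter_append]
  congr 1
  by_cases h : n % kn == j <;> simp [h]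

theorem pvMapRange_getD {β : Type} (kn p : ℕ) (f : ℕ → β) (d : β) (hp : p < kn) :
    ((List.range kn).map f).getD p d = f p := by
  simp [List.getD_eq_getElem?_getD, List.getElem?_map, List.getElem?_range hp]

theorem pvMapRange_set {β : Type} (kn p : ℕ) (f : ℕ → β) (v : β) (_hp : p < kn) :
    ((List.range kn).map f).set p v
      = (List.range kn).map (fun j => if j = p then v else f j) := by
  apply List.ext_getElem
  · simp
  · intro i h1 h2
    simp only [List.length_set, List.length_map, List.length_range] at h1
    rw [List.getElem_set]
    by_cases hip : p = i
    · simp [hip]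
    · rw [if_neg hip, List.getElem_map, List.getElem_map, List.getElem_range,
        if_neg (fun h => hip h.symm)]

-- generic: the ports' "write at slot i % kn" fold computes a per-column fold
theorem pvFoldColumns {β : Type} (t : List Char) (kn : ℕ) (hk : 0 < kn)
    (step : β → Char → β) (init : β) (dflt : β) (n : ℕ) :
    (List.range n).foldl
      (fun st i => st.set (i % kn) (step (st.getD (i % kn) dflt) (t.getD i ' ')))
      (List.replicate kn init)
    = (List.range kn).map
        (fun j => ((pvColIdx n kn j).map (fun i => t.getD i ' ')).foldl step init) := by
  induction n with
  | zero =>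
    simp only [List.range_zero, List.foldl_nil, pvColIdx, List.filter_nil, List.map_nil]
    rw [List.map_const', List.length_range]
  | succ n ih =>
    rw [List.range_succ, List.foldl_append, ih]
    have hp : n % kn < kn := Nat.mod_lt _ hk
    rw [List.foldl_cons, List.foldl_nil, pvMapRange_getD kn _ _ _ hp, pvMapRange_set kn _ _ _ hp]
    apply List.map_congr_left
    intro j hj
    rw [List.mem_range] at hj
    rw [pvColIdx_succ]
    by_cases hjp : j = n % kn
    · simp [hjp]
    · have : ¬ (n % kn == j) = true := by simpa using fun h => hjp h.symm
      simp [hjp, this]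

theorem pvRowEq (t : List Char) (kn a : ℕ) :
    (List.range kn).filterMap
        (fun j => if a + j < t.length then some (t.getD (a + j) ' ') else none)
      = (t.drop a).take kn := by
  induction kn generalizing a with
  | zero => simp
  | succ kn ih =>
    rw [List.range_succ_eq_map, List.filterMap_cons, List.filterMap_map]
    have hfun : ((fun j => if a + j < t.length then some (t.getD (a + j) ' ') else none) ∘ Nat.succ)
        = (fun j => if (a + 1) + j < t.length then some (t.getD ((a + 1) + j) ' ') else none) := by
      funext j
      simp only [Function.comp_apply]
      rw [show a + Nat.succ j = (a + 1) + j by omega]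
    rw [hfun, ih (a + 1)]
    by_cases ha : a < t.length
    · rw [List.drop_eq_getElem_cons ha, List.take_succ_cons]
      simp [ha]
    · have hd : t.drop a = [] := List.drop_eq_nil_of_le (by omega)
      have hd1 : t.drop (a + 1) = [] := List.drop_eq_nil_of_le (by omega)
      simp [ha, hd, hd1]

theorem pvFlatMapChunks (kn : ℕ) (_hk : 0 < kn) (M : ℕ) (t : List Char)
    (hlen : t.length ≤ M * kn) :
    (List.range M).flatMap (fun i => (t.drop (i * kn)).take kn) = t := by
  induction M generalizing t with
  | zero =>
    have : t = [] := List.eq_nil_of_length_eq_zero (by omega)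
    simp [this]
  | succ M ih =>
    rw [List.range_succ_eq_map, List.flatMap_cons, List.flatMap_map]
    have hfun : (fun (a : ℕ) => List.take kn (List.drop (a.succ * kn) t))
        = (fun i => ((t.drop kn).drop (i * kn)).take kn) := by
      funext i
      rw [List.drop_drop, show Nat.succ i * kn = kn + i * kn by rw [Nat.succ_mul]; omega,
        Nat.add_comm]
    rw [hfun, ih (t.drop kn) (by rw [Nat.succ_mul] at hlen; simp; omega)]
    simp

theorem pvInnerRow (decs : List (List Char)) (i : ℕ) (acc : List Char) :
    decs.foldl (fun a col => if i < col.length then a ++ [col.getD i ' '] else a) acc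
      = acc ++ decs.filterMap (fun col => col[i]?) := by
  induction decs generalizing acc with
  | nil => simp
  | cons u rest ih =>
    rw [List.foldl_cons, ih, List.filterMap_cons]
    by_cases h : i < u.length
    · simp [h]
    · simp [h]

theorem pvColOf_ne_nil (cs : List Char) (kn j : ℕ) (hj : j < kn) (hjn : j < cs.length) :
    pvColOf cs j kn ≠ [] := by
  have : 0 < (pvColOf cs j kn).length := by
    unfold pvColOf
    rw [List.length_map]
    rw [pvColIdx_lt_iff cs.length kn j hj 0]
    omega
  exact List.ne_nil_of_length_pos this

-- the max over a column's distribution exists, and pvKey is its shift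
theorem pvMaxKey (cs : List Char) (kn j : ℕ) (hj : j < kn) (hjn : j < cs.length) :
    ∃ m, PySem.List.max? (pvDist cs kn j).keys (fun x => (pvDist cs kn j).getD x 0) = some m
      ∧ pvKey cs kn j = (m.toNat : Int) - 101 := by
  have hkeys : (pvDist cs kn j).keys = PySem.Set.ofList (pvColOf cs j kn) := by
    unfold pvDist
    rw [show pvCountStepB = (fun (d : PySem.Dict Char Int) c => d.insert c (d.getD c 0 + 1)) from rfl]
    rw [PySem.Dict.keys_foldl_insert, PySem.Dict.keys_empty, PySem.Set.update_nil_left]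
  have hne : (pvDist cs kn j).keys ≠ [] := by
    rw [hkeys]
    intro hnil
    cases hc : pvColOf cs j kn with
    | nil => exact pvColOf_ne_nil cs kn j hj hjn hc
    | cons c rest =>
      have hmem : c ∈ PySem.Set.ofList (pvColOf cs j kn) :=
        (PySem.Set.mem_ofList _ _).mpr (by rw [hc]; exact List.mem_cons_self)
      rw [hnil] at hmem
      exact (List.not_mem_nil).elim hmem
  cases hm : PySem.List.max? (pvDist cs kn j).keys (fun x => (pvDist cs kn j).getD x 0) with
  | none => exact absurd ((PySem.List.max?_eq_none_iff _ _).mp hm) hne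
  | some m =>
    refine ⟨m, rfl, ?_⟩
    unfold pvKey
    rw [hm]

-- A's cryptanalyse_substitution on a (nonempty) column is the per-column shift map
theorem pvCryptSub_col (cs : List Char) (kn j : ℕ) (hj : j < kn) (hjn : j < cs.length) :
    pvCryptSub (pvColOf cs j kn)
      = some ((pvColOf cs j kn).map (fun ch => pvShift ch (pvKey cs kn j))) := by
  obtain ⟨m, hm, hk⟩ := pvMaxKey cs kn j hj hjn
  unfold pvCryptSub
  have hdist : pvLetterDistribution (pvColOf cs j kn) = pvDist cs kn j := by
    unfold pvLetterDistribution pvDist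
    rw [pvCountStep_eq]
  rw [hdist, hm]
  simp only [PySem.List.foldl_append_singleton_eq_map, List.nil_append, hk]

-- each decrypted column, and the decoded string both ports produce
def pvDec (cs : List Char) (kn j : ℕ) : List Char :=
  (pvColOf cs j kn).map (fun ch => pvShift ch (pvKey cs kn j))
def pvTarget (cs : List Char) (kn : ℕ) : List Char :=
  (List.range cs.length).map (fun i => pvShift (cs.getD i ' ') (pvKey cs kn (i % kn)))

theorem pvRow (cs : List Char) (kn : ℕ) (i : ℕ) :
    ((List.range kn).map (pvDec cs kn)).filterMap (fun col => col[i]?)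
      = ((pvTarget cs kn).drop (i * kn)).take kn := by
  rw [List.filterMap_map]
  have htl : (pvTarget cs kn).length = cs.length := by
    unfold pvTarget; rw [List.length_map, List.length_range]
  have hcg : ∀ j ∈ List.range kn, ((fun col => col[i]?) ∘ pvDec cs kn) j
      = (if i * kn + j < (pvTarget cs kn).length
          then some ((pvTarget cs kn).getD (i * kn + j) ' ') else none) := by
    intro j hj
    rw [List.mem_range] at hj
    simp only [Function.comp_apply, pvDec, pvColOf, List.getElem?_map,
      pvColIdx_get cs.length kn j hj i, htl]
    by_cases hin : i * kn + j < cs.length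
    · rw [if_pos hin, if_pos hin]
      simp only [Option.map_some]
      unfold pvTarget
      rw [pvMapRange_getD cs.length (i * kn + j) _ ' ' hin]
      rw [show (i * kn + j) % kn = j by
        rw [Nat.add_comm, Nat.add_mul_mod_self_right, Nat.mod_eq_of_lt hj]]
    · rw [if_neg hin, if_neg hin]
      rfl
  rw [List.filterMap_congr hcg, pvRowEq (pvTarget cs kn) kn (i * kn)]

-- B's port computes the decoded string
theorem pvB (s : String) (k : Int) (h1 : 1 ≤ k) (h2 : k ≤ PySem.Str.len s) :
    cryptanalyse_vigenere_afterlength_alt s k = String.ofList (pvTarget s.toList k.toNat) := by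
  have hlen : PySem.Str.len s = (s.toList.length : Int) := by simp [PySem.Str.len]
  rw [hlen] at h2
  have hkn : 0 < k.toNat := by omega
  have hle : k.toNat ≤ s.toList.length := by omega
  have hg : ¬ (k ≤ 0 ∧ s.toList ≠ []) := fun ⟨hk0, _⟩ => absurd h1 (by omega)
  simp only [cryptanalyse_vigenere_afterlength_alt]
  rw [if_neg hg]
  rw [pvFoldColumns s.toList k.toNat hkn pvCountStepB PySem.Dict.empty PySem.Dict.empty
    s.toList.length]
  rw [show (fun j => ((pvColIdx s.toList.length k.toNat j).map
        (fun i => s.toList.getD i ' ')).foldl pvCountStepB PySem.Dict.empty)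
      = fun j => pvDist s.toList k.toNat j from rfl]
  rw [List.map_map]
  have hsh : ∀ j ∈ List.range k.toNat,
      ((fun d => (PySem.List.max? (PySem.Dict.keys d) (fun x => PySem.Dict.getD d x 0)).map
          (fun m => ((m.toNat : Int) - 101))) ∘ fun j => pvDist s.toList k.toNat j) j
        = some (pvKey s.toList k.toNat j) := by
    intro j hj
    rw [List.mem_range] at hj
    obtain ⟨m, hm, hkey⟩ := pvMaxKey s.toList k.toNat j hj (lt_of_lt_of_le hj hle)
    simp only [Function.comp_apply, hm, Option.map_some, hkey]
  rw [List.map_congr_left hsh]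
  rw [if_pos (by simp)]
  apply congrArg String.ofList
  unfold pvTarget
  apply List.map_congr_left
  intro i hi
  rw [pvMapRange_getD k.toNat (i % k.toNat) _ none (Nat.mod_lt i hkn)]
  rfl

-- A's port computes the decoded string
theorem pvA (s : String) (k : Int) (h1 : 1 ≤ k) (h2 : k ≤ PySem.Str.len s) :
    cryptanalyse_vigenere_afterlength s k = String.ofList (pvTarget s.toList k.toNat) := by
  have hlen : PySem.Str.len s = (s.toList.length : Int) := by simp [PySem.Str.len]
  rw [hlen] at h2
  have hkn : 0 < k.toNat := by omega
  have hle : k.toNat ≤ s.toList.length := by omega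
  have hg : ¬ (k ≤ 0 ∧ s.toList ≠ []) := fun ⟨hk0, _⟩ => absurd h1 (by omega)
  simp only [cryptanalyse_vigenere_afterlength]
  rw [if_neg hg]
  rw [pvFoldColumns s.toList k.toNat hkn (fun a ch => a ++ [ch]) [] [] s.toList.length]
  have hsubs : (fun j => ((pvColIdx s.toList.length k.toNat j).map
        (fun i => s.toList.getD i ' ')).foldl (fun a ch => a ++ [ch]) [])
      = fun j => pvColOf s.toList j k.toNat := by
    funext j
    rw [PySem.List.foldl_append_singleton_eq_self, List.nil_append]
    rfl
  rw [hsubs]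
  rw [PySem.List.foldl_append_singleton_eq_map, List.nil_append, List.map_map]
  have hsub2 : ∀ j ∈ List.range k.toNat,
      (pvCryptSub ∘ fun j => pvColOf s.toList j k.toNat) j = some (pvDec s.toList k.toNat j) := by
    intro j hj
    rw [List.mem_range] at hj
    simp only [Function.comp_apply]
    rw [pvCryptSub_col s.toList k.toNat j hj (lt_of_lt_of_le hj hle)]
    rfl
  rw [List.map_congr_left hsub2]
  rw [if_pos (by simp)]
  rw [show ((List.range k.toNat).map (fun j => some (pvDec s.toList k.toNat j))).map
        (fun o => o.getD []) = (List.range k.toNat).map (pvDec s.toList k.toNat) by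
      rw [List.map_map]; rfl]
  cases hmx : PySem.List.max? ((List.range k.toNat).map (pvDec s.toList k.toNat))
      (fun x => PySem.List.len x) with
  | none =>
    exfalso
    have := (PySem.List.max?_eq_none_iff _ _).mp hmx
    rw [List.map_eq_nil_iff, List.range_eq_nil] at this
    omega
  | some mx =>
    dsimp only
    have hbound : ∀ j, j < k.toNat → (pvColOf s.toList j k.toNat).length ≤ mx.length := by
      intro j hj
      have hmem : pvDec s.toList k.toNat j ∈ (List.range k.toNat).map (pvDec s.toList k.toNat) :=
        List.mem_map.mpr ⟨j, List.mem_range.mpr hj, rfl⟩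
      have hIm := PySem.List.max?_isMax hmx _ hmem
      rw [PySem.List.len_eq, PySem.List.len_eq] at hIm
      have : (pvDec s.toList k.toNat j).length ≤ mx.length := by exact_mod_cast hIm
      simpa [pvDec] using this
    have hcov : s.toList.length ≤ mx.length * k.toNat := by
      by_contra hno
      rw [Nat.not_le] at hno
      have h0 : mx.length < (pvColIdx s.toList.length k.toNat 0).length :=
        (pvColIdx_lt_iff s.toList.length k.toNat 0 hkn mx.length).2 (by omega)
      have hl0 : (pvColOf s.toList 0 k.toNat).length = (pvColIdx s.toList.length k.toNat 0).length := by
        unfold pvColOf; rw [List.length_map]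
      have := hbound 0 hkn
      omega
    rw [PySem.List.foldl_congr_mem _ _
      (fun acc i => acc ++ ((List.range k.toNat).map (pvDec s.toList k.toNat)).filterMap
        (fun col => col[i]?)) []
      (fun acc x _ => pvInnerRow _ x acc)]
    rw [PySem.List.foldl_append_eq_flatMap, List.nil_append]
    rw [show (fun i => ((List.range k.toNat).map (pvDec s.toList k.toNat)).filterMap
          (fun col => col[i]?))
        = fun i => ((pvTarget s.toList k.toNat).drop (i * k.toNat)).take k.toNat from
      funext (fun i => pvRow s.toList k.toNat i)]
    apply congrArg String.ofList
    refine pvFlatMapChunks k.toNat hkn mx.length (pvTarget s.toList k.toNat) ?_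
    rw [show (pvTarget s.toList k.toNat).length = s.toList.length by
      unfold pvTarget; rw [List.length_map, List.length_range]]
    exact hcov

-- the verdict, proved on the list level
theorem pvMain (s : String) (k : Int) (h1 : 1 ≤ k) (h2 : k ≤ PySem.Str.len s) :
    cryptanalyse_vigenere_afterlength s k = cryptanalyse_vigenere_afterlength_alt s k := by
  rw [pvA s k h1 h2, pvB s k h1 h2]

-- ===== VERDICT (by name: the statement is the Claim_ definition above) =====
theorem cryptanalyse_vigenere_afterlength_spec : Claim_equal_cryptanalyse_vigenere_afterlength := by
  intro s k _ hpre
  unfold Spec_cryptanalyse_vigenere_afterlength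
  exact pvMain s k hpre.1 hpre.2
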